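-- pv_equiv track=rewrite | github.com/Krishn1101/Problems-on-Python | Squares_In_NXN_Chessboard.py | squaresInChessBoard
-- ===== SOURCE A (Python) =====
-- def squaresInChessBoard(N):
--     cnt = 1
--     sm = 0
--     i=1
--     while(cnt!=N+1):
--         sm+=i*i
--         i+=1
--         cnt+=1
--     return sm
-- ===== SOURCE B (Python) =====
-- def squaresInChessBoard(N):
--     return N * (N + 1) * (2 * N + 1) // 6
-- ===== Notes on version B (the rewrite author's own statement) =====
-- stated objective: faster
-- what changed: Replaced the while-loop summation of squares by the closed-form N(N+1)(2N+1)//6.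
-- outside the precondition, e.g. on squaresInChessBoard(-1): A does not finish within the time limit, B returns 0
import Mathlib
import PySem

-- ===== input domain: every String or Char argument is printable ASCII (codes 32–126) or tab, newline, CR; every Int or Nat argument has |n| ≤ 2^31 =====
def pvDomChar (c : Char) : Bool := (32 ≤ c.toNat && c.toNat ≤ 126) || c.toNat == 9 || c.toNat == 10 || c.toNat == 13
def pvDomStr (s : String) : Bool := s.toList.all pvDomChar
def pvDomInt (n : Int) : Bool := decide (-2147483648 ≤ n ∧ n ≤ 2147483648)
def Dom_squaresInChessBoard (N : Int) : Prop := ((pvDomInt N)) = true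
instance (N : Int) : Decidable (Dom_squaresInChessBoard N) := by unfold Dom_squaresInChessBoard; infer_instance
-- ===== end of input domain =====

-- B replaces A's O(N) while-loop summation by the closed form N(N+1)(2N+1)//6 (asymptotically faster).
-- Pre_ excludes N < 0, on which A's while-loop never terminates (cnt starts above N+1).

-- ===== PORT A =====
-- the while(cnt != N+1) loop; for cnt > N+1 the Python loop diverges (outside Pre_),
-- the port returns sm there so as to be total.
def squaresInChessBoardLoop (N cnt sm i : Int) : Int :=
  if cnt = N + 1 then sm
  else if _h : cnt < N + 1 then squaresInChessBoardLoop N (cnt + 1) (sm + i * i) (i + 1)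
  else sm
termination_by (N + 1 - cnt).toNat
decreasing_by omega

def squaresInChessBoard (N : Int) : Int :=
  squaresInChessBoardLoop N 1 0 1

-- ===== PORT B =====
def squaresInChessBoard_alt (N : Int) : Int :=
  PySem.Int.floordiv (N * (N + 1) * (2 * N + 1)) 6

-- ===== PRECONDITION & SPEC =====
-- Pre_ excludes exactly the inputs where A diverges (N < 0): the while condition cnt != N+1 is never met.
def Pre_squaresInChessBoard (N : Int) : Prop := 0 ≤ N
instance (N : Int) : Decidable (Pre_squaresInChessBoard N) := by unfold Pre_squaresInChessBoard; infer_instance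
def pvWitness_squaresInChessBoard : Int := (5)

def Spec_squaresInChessBoard (N : Int) (out : Int) : Prop := out = squaresInChessBoard_alt N
instance (N : Int) (out : Int) : Decidable (Spec_squaresInChessBoard N out) := by unfold Spec_squaresInChessBoard; infer_instance

-- ===== CLAIM (what is proved, stated in full; the proofs are below) =====
def Claim_equal_squaresInChessBoard : Prop := ∀ (N : Int), Dom_squaresInChessBoard N → Pre_squaresInChessBoard N → Spec_squaresInChessBoard N (squaresInChessBoard N)

-- ===== LEMMAS AND PROOFS =====

-- loop characterisation: with n steps left, the loop adds (i+0)² + … + (i+n-1)²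
theorem squaresInChessBoardLoop_eq (n : Nat) : ∀ (N sm i : Int), N + 1 - (n : Int) = N + 1 - n →
    squaresInChessBoardLoop N (N + 1 - n) sm i
      = sm + ∑ j ∈ Finset.range n, (i + (j : Int)) ^ 2 := by
  induction n with
  | zero =>
    intro N sm i _
    rw [squaresInChessBoardLoop]
    simp
  | succ k ih =>
    intro N sm i _
    rw [squaresInChessBoardLoop]
    rw [if_neg (by push_cast; omega), dif_pos (by push_cast; omega)]
    have hstep : N + 1 - ((k : Nat) + 1 : Nat) + 1 = N + 1 - (k : Int) := by push_cast; omega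
    rw [hstep, ih N (sm + i * i) (i + 1) rfl]
    rw [Finset.sum_range_succ']
    have hc : (∑ j ∈ Finset.range k, (i + 1 + (j : Int)) ^ 2)
        = ∑ j ∈ Finset.range k, (i + ((j + 1 : Nat) : Int)) ^ 2 :=
      Finset.sum_congr rfl (fun j _ => by push_cast; ring)
    rw [hc]
    push_cast
    ring

-- six times the sum of 1²..n² equals n(n+1)(2n+1)
theorem six_mul_sum_sq (n : Nat) :
    6 * ∑ j ∈ Finset.range n, ((1 : Int) + (j : Int)) ^ 2
      = (n : Int) * ((n : Int) + 1) * (2 * (n : Int) + 1) := by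
  induction n with
  | zero => simp
  | succ k ih =>
    rw [Finset.sum_range_succ]
    push_cast
    push_cast at ih
    ring_nf
    ring_nf at ih
    omega

-- ===== VERDICT (by name: the statement is the Claim_ definition above) =====
theorem squaresInChessBoard_spec : Claim_equal_squaresInChessBoard := by
  intro N _ hN
  unfold Spec_squaresInChessBoard squaresInChessBoard squaresInChessBoard_alt
  have hN' : (0 : Int) ≤ N := hN
  set n : Nat := N.toNat with hn
  have hNn : (n : Int) = N := by omega
  have h1 := squaresInChessBoardLoop_eq n N 0 1 rfl
  rw [show N + 1 - (n : Int) = 1 from by omega] at h1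
  rw [h1]
  have hsum := six_mul_sum_sq n
  rw [hNn] at hsum
  have : N * (N + 1) * (2 * N + 1) = 6 * (0 + ∑ j ∈ Finset.range n, ((1 : Int) + (j : Int)) ^ 2) := by
    rw [← hsum]; ring
  rw [this, mul_comm, PySem.Int.floordiv_eq_ediv_of_pos (by norm_num),
    Int.mul_ediv_cancel _ (by norm_num)]
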